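-- pv_equiv track=rewrite | github.com/harshitpoddar09/InterviewBit-Solutions | Programming/Binary Search/Simple Binary Search/Wood Cutting Made Easy!.py | solve
-- ===== SOURCE A (Python) =====
-- def solve(A, B):
--     def cutwood(height):
--         sum=0
--         for i in A:
--             if i>height:
--                 sum+=i-height
--         return sum>=B
--     lo=0
--     hi=max(A)
--     while lo<=hi:
--         mid=(lo+hi)//2
--         if cutwood(mid):
--             lo=mid+1
--         else:
--             hi=mid-1
--     return lo-1
-- ===== SOURCE B (Python) =====
-- def solve(A, B):
--     # Sort once and precompute suffix sums; each probe of the binary search on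
--     # the height is answered by a bisect plus arithmetic on the suffix sums.
--     S = sorted(A)
--     n = len(S)
--     suf = [0] * (n + 1)
--     for i in range(n - 1, -1, -1):
--         suf[i] = suf[i + 1] + S[i]
--
--     def bisect_right(x):
--         # textbook bisect.bisect_right on S: first index with S[idx] > x
--         lo, hi = 0, n
--         while lo < hi:
--             mid = (lo + hi) // 2
--             if S[mid] <= x:
--                 lo = mid + 1
--             else:
--                 hi = mid
--         return lo
--
--     lo, hi = 0, max(A)
--     while lo <= hi:
--         mid = (lo + hi) // 2
--         k = bisect_right(mid)
--         if suf[k] - mid * (n - k) >= B: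
--             lo = mid + 1
--         else:
--             hi = mid - 1
--     return lo - 1
-- ===== Notes on version B (the rewrite author's own statement) =====
-- stated objective: alternative
-- what changed: B sorts A once and precomputes suffix sums of the sorted list, answering each probe of the binary search on the height by a bisect plus arithmetic instead of rescanning the whole list; measured runtime is comparable.
import Mathlib
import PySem

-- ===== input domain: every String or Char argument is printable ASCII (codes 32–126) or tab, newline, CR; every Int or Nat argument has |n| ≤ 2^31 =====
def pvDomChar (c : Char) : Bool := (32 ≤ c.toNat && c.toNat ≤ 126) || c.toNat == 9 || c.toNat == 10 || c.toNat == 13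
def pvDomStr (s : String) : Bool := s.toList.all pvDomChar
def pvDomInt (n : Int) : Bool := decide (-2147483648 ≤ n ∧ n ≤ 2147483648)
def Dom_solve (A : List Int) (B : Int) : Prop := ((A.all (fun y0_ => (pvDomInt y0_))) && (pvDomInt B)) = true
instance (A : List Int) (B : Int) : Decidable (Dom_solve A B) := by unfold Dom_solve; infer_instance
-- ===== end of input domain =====

-- B sorts A once and keeps suffix sums of the sorted list: each probe of the
-- binary search on the height is a bisect plus arithmetic on the suffix sums.


-- ===== PORT A =====
-- cutwood(height): linear scan summing i - height over i > height, compared to B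
def cutwoodA (A : List Int) (height : Int) (B : Int) : Bool :=
  (A.foldl (fun s i => if i > height then s + (i - height) else s) 0) ≥ B

-- the while lo <= hi loop; fuel = (hi+2).toNat bounds the iteration count
-- (the bracket length hi-lo+1 strictly shrinks every iteration)
def solveLoopA (A : List Int) (B : Int) (lo hi : Int) : Nat → Int
  | 0 => lo - 1
  | fuel + 1 =>
    if lo ≤ hi then
      let mid := PySem.Int.floordiv (lo + hi) 2
      if cutwoodA A mid B then solveLoopA A B (mid + 1) hi fuel
      else solveLoopA A B lo (mid - 1) fuel
    else lo - 1

def solve (A : List Int) (B : Int) : Int :=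
  let hi := (PySem.List.max? A (fun x => x)).getD 0   -- max(A); A = [] raises, excluded by Pre_
  solveLoopA A B 0 hi (hi + 2).toNat

-- ===== PORT B =====
-- suf[i] = suf[i+1] + S[i] built back-to-front; sufSums S has length |S|+1, last entry 0
def sufSums : List Int → List Int
  | [] => [0]
  | x :: t => (x + (sufSums t).headD 0) :: sufSums t

-- Source B's hand-written textbook bisect_right loop on the sorted list S is the
-- stdlib primitive; ported as PySem.List.bisectRight (exact on every list)
def solveLoopB (S : List Int) (suf : List Int) (B : Int) (lo hi : Int) : Nat → Int
  | 0 => lo - 1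
  | fuel + 1 =>
    if lo ≤ hi then
      let mid := PySem.Int.floordiv (lo + hi) 2
      let k := PySem.List.bisectRight S mid
      if suf.getD k 0 - mid * ((S.length : Int) - (k : Int)) ≥ B then
        solveLoopB S suf B (mid + 1) hi fuel
      else solveLoopB S suf B lo (mid - 1) fuel
    else lo - 1

def solve_alt (A : List Int) (B : Int) : Int :=
  let S := PySem.List.sorted A (fun x => x) false
  let suf := sufSums S
  let hi := (PySem.List.max? A (fun x => x)).getD 0   -- max(A); A = [] raises, excluded by Pre_
  solveLoopB S suf B 0 hi (hi + 2).toNat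

-- ===== PRECONDITION & SPEC =====
-- Pre_ excludes exactly A = [], where the Python A (and B) raises ValueError at max(A)
def Pre_solve (A : List Int) (B : Int) : Prop := A ≠ []
instance (A : List Int) (B : Int) : Decidable (Pre_solve A B) := by unfold Pre_solve; infer_instance
def pvWitness_solve : List Int × Int := ([3, 1, 5], 4)

def Spec_solve (A : List Int) (B : Int) (out : Int) : Prop := out = solve_alt A B
instance (A : List Int) (B : Int) (out : Int) : Decidable (Spec_solve A B out) := by unfold Spec_solve; infer_instance

-- ===== CLAIM (what is proved, stated in full; the proofs are below) =====
def Claim_equal_solve : Prop := ∀ (A : List Int) (B : Int), Dom_solve A B → Pre_solve A B → Spec_solve A B (solve A B)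

-- ===== LEMMAS AND PROOFS =====

theorem sum_map_sub (l : List Int) (h : Int) :
    (l.map (fun x => x - h)).sum = l.sum - l.length * h := by
  induction l with
  | nil => simp
  | cons a t ih => simp [ih]; ring

theorem sufSums_getD (S : List Int) (k : Nat) :
    (sufSums S).getD k 0 = (S.drop k).sum := by
  induction S generalizing k with
  | nil => cases k <;> simp [sufSums]
  | cons x t ih =>
    cases k with
    | zero =>
      have h0 := ih 0
      cases ht : sufSums t with
      | nil => simp [sufSums, ht] at h0 ⊢; omega
      | cons y ys => simp [sufSums, ht] at h0 ⊢; omega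
    | succ k => simpa [sufSums] using ih k

-- the per-height predicate of A equals the sorted/suffix-sum formula of B
theorem cut_eq (A : List Int) (h : Int) :
    (A.foldl (fun s i => if i > h then s + (i - h) else s) 0) =
      (sufSums (PySem.List.sorted A (fun x => x) false)).getD
          (PySem.List.bisectRight (PySem.List.sorted A (fun x => x) false) h) 0
        - h * (((PySem.List.sorted A (fun x => x) false).length : Int)
               - (PySem.List.bisectRight (PySem.List.sorted A (fun x => x) false) h : Int)) := by
  set S := PySem.List.sorted A (fun x => x) false with hS
  set g : Int → Int := fun i => if h < i then i - h else 0 with hg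
  set k := PySem.List.bisectRight S h with hk
  have hpw : S.Pairwise (· ≤ ·) := PySem.List.sorted_pairwise A (fun x => x)
  obtain ⟨hkle, hlt, hgt⟩ := PySem.List.bisectRight_spec S h hpw
  -- A's loop as a mapped sum
  have h1 : (A.foldl (fun s i => if i > h then s + (i - h) else s) 0) = (A.map g).sum := by
    have : (A.foldl (fun s i => if i > h then s + (i - h) else s) 0)
         = (A.foldl (fun s i => s + g i) 0) := by
      congr 1; funext s i; simp only [hg]; split_ifs <;> omega
    rw [this, PySem.List.foldl_add]; simp
  -- permutation invariance
  have h2 : (A.map g).sum = (S.map g).sum :=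
    (List.Perm.sum_eq (List.Perm.map g (PySem.List.sorted_perm A (fun x => x) false))).symm
  -- split at k
  have hsplit : (S.map g).sum = ((S.take k).map g).sum + ((S.drop k).map g).sum := by
    rw [← List.sum_append, ← List.map_append, List.take_append_drop]
  have htake : ((S.take k).map g).sum = 0 := by
    apply List.sum_eq_zero
    intro y hy
    obtain ⟨x, hx, rfl⟩ := List.mem_map.mp hy
    obtain ⟨j, hj, rfl⟩ := List.mem_iff_getElem.mp hx
    have hjk : j < k := lt_of_lt_of_le hj (by simp [List.length_take])
    have hjn : j < S.length := by
      have := hj; simp [List.length_take] at this; omega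
    have : S[j] ≤ h := by
      have := hlt j hjn hjk
      simpa using this
    rw [List.getElem_take]
    simp [hg, not_lt.mpr this]
  have hdropmem : ∀ x ∈ S.drop k, h < x := by
    intro x hx
    obtain ⟨j, hj, rfl⟩ := List.mem_iff_getElem.mp hx
    rw [List.getElem_drop]
    exact hgt (k + j) (by simp [List.length_drop] at hj; omega) (by omega)
  have hdrop : ((S.drop k).map g).sum
      = (S.drop k).sum - h * (((S.length : Int)) - (k : Int)) := by
    have hmapeq : (S.drop k).map g = (S.drop k).map (fun x => x - h) :=
      List.map_congr_left (fun x hx => by simp [hg, hdropmem x hx])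
    rw [hmapeq, sum_map_sub]
    have hlen : ((S.drop k).length : Int) = (S.length : Int) - (k : Int) := by
      simp [List.length_drop]; omega
    rw [hlen]; ring
  rw [h1, h2, hsplit, htake, hdrop, sufSums_getD, zero_add]

-- both binary-search loops coincide step for step
theorem loops_eq (A : List Int) (B : Int) :
    ∀ (fuel : Nat) (lo hi : Int),
      solveLoopA A B lo hi fuel =
      solveLoopB (PySem.List.sorted A (fun x => x) false)
        (sufSums (PySem.List.sorted A (fun x => x) false)) B lo hi fuel := by
  intro fuel
  induction fuel with
  | zero => intro lo hi; rfl
  | succ f ih =>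
    intro lo hi
    simp only [solveLoopA, solveLoopB, cutwoodA, cut_eq A, ih, decide_eq_true_eq]

theorem solve_eq_alt (A : List Int) (B : Int) : solve A B = solve_alt A B := by
  unfold solve solve_alt
  exact loops_eq A B _ 0 _

-- ===== VERDICT (by name: the statement is the Claim_ definition above) =====
theorem solve_spec : Claim_equal_solve := by
  intro A B _ _
  unfold Spec_solve
  exact solve_eq_alt A B
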